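-- pv_equiv track=rewrite | github.com/chauhansachin11/python_learning | general_question/kruskal_s_algo.py | add_visit
-- ===== SOURCE A (Python) =====
-- def add_visit(v_ar,edge):
--     l=len(v_ar)
--     for i in range(l):
--         if(edge[0] in v_ar[i]):
--             if(edge[1] in v_ar[i]):
--                 return(0,v_ar)
--             else:
--                 for j in range(l):
--                     if(edge[1] in v_ar[j]):
--                          v_ar=[v_ar[i]+v_ar[j]]+list(filter(lambda x:x!=v_ar[i] and x!=v_ar[j],v_ar))
--                          return(1,v_ar)
--                 v_ar[i]+=[edge[1]]
--                 return(1,v_ar)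
--         elif(edge[1] in v_ar[i]):
--              for j in range(l):
--                  if(edge[0] in v_ar[j]):
--                      v_ar=[v_ar[i]+v_ar[j]]+list(filter(lambda x:x!=v_ar[i] and x!=v_ar[j],v_ar))
--                      return(1,v_ar)
--              v_ar[i]+=[edge[0]]
--              return(1,v_ar)
--     v_ar+=[[edge[0],edge[1]]]
--     return(1,v_ar)
-- ===== SOURCE B (Python) =====
-- def add_visit(v_ar, edge):
--     # Hash-index approach: one pass over all vertices builds a dict
--     # vertex -> first component index; endpoint lookups are then O(1)
--     # and A's nested rescans disappear.  Non-mutating (return value only).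
--     idx = {}
--     for k, comp in enumerate(v_ar):
--         for x in comp:
--             idx.setdefault(x, k)
--     i0 = idx.get(edge[0])
--     i1 = idx.get(edge[1])
--     if i0 is None and i1 is None:
--         return (1, v_ar + [[edge[0], edge[1]]])
--     if i0 is None:
--         return (1, v_ar[:i1] + [v_ar[i1] + [edge[0]]] + v_ar[i1+1:])
--     if i1 is None:
--         return (1, v_ar[:i0] + [v_ar[i0] + [edge[1]]] + v_ar[i0+1:])
--     if i0 == i1:
--         return (0, v_ar)
--     lo, hi = min(i0, i1), max(i0, i1)
--     merged = v_ar[lo] + v_ar[hi]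
--     return (1, [merged] + [x for x in v_ar if x != v_ar[lo] and x != v_ar[hi]])
-- ===== Notes on version B (the rewrite author's own statement) =====
-- stated objective: alternative
-- what changed: Replaces A's interleaved outer scan with nested rescans by one pass that builds a dict mapping each vertex to its first component index (setdefault), then two O(1) lookups and a flat four-way case split; B is non-mutating while A appends in place in some branches (return values are equal).
-- outside the precondition, e.g. on add_visit([[1, 2]], [1]): A raises IndexError, B raises IndexError
import Mathlib
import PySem

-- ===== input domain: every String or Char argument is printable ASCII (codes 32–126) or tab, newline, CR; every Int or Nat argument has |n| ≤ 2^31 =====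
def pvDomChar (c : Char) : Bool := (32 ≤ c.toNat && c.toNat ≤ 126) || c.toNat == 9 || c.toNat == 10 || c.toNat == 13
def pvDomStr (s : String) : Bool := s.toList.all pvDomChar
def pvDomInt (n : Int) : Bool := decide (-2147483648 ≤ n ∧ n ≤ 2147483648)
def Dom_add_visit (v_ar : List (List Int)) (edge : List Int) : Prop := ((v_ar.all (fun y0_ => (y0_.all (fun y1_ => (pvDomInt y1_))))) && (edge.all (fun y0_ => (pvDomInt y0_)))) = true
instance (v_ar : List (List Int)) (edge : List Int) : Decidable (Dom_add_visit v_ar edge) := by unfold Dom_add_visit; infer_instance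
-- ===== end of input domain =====

-- B builds a vertex -> first-component-index dict in one pass and then branches flatly,
-- instead of A's interleaved outer scan with nested rescans; A mutates v_ar in place in the
-- append branches while B is non-mutating — the equivalence proved is about the return value.

-- ===== PORT A =====
-- A's inner loop 'for j in range(l): if e in v_ar[j]: …' — first index whose list contains e
def pvInnerA : List (List Int) → Int → Option Nat
  | [], _ => none
  | v :: rest, e => if e ∈ v then some 0 else (pvInnerA rest e).map (· + 1)

-- A's outer loop over i in range(l); orig is the whole v_ar, rest the part from index i on
def pvOuterA (orig : List (List Int)) (e0 e1 : Int) : List (List Int) → Nat → Int × List (List Int)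
  | [], _ => (1, orig ++ [[e0, e1]])
  | vi :: rest, i =>
    if e0 ∈ vi then
      if e1 ∈ vi then (0, orig)
      else
        match pvInnerA orig e1 with
        | some j => (1, (vi ++ orig.getD j []) :: orig.filter (fun x => x != vi && x != orig.getD j []))
        | none => (1, orig.set i (vi ++ [e1]))
    else if e1 ∈ vi then
      match pvInnerA orig e0 with
      | some j => (1, (vi ++ orig.getD j []) :: orig.filter (fun x => x != vi && x != orig.getD j []))
      | none => (1, orig.set i (vi ++ [e0]))
    else pvOuterA orig e0 e1 rest (i + 1)

def add_visit (v_ar : List (List Int)) (edge : List Int) : Int × List (List Int) :=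
  pvOuterA v_ar (edge.getD 0 0) (edge.getD 1 0) v_ar 0

-- ===== PORT B =====
-- Source B's index-building pass: for k, comp in enumerate(v_ar): for x in comp: idx.setdefault(x, k)
def pvBuildIdx (v_ar : List (List Int)) : PySem.Dict Int Int :=
  (PySem.List.enumerate v_ar 0).foldl
    (fun d kc => kc.2.foldl (fun d x => d.setdefault x kc.1) d) PySem.Dict.empty

-- Source B's flat case split on (idx.get(edge[0]), idx.get(edge[1]))
def add_visit_alt (v_ar : List (List Int)) (edge : List Int) : Int × List (List Int) :=
  let idx := pvBuildIdx v_ar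
  match idx.get? (edge.getD 0 0), idx.get? (edge.getD 1 0) with
  | none, none => (1, v_ar ++ [[edge.getD 0 0, edge.getD 1 0]])
  | none, some b =>
      (1, v_ar.take b.toNat ++ [v_ar.getD b.toNat [] ++ [edge.getD 0 0]] ++ v_ar.drop (b.toNat + 1))
  | some a, none =>
      (1, v_ar.take a.toNat ++ [v_ar.getD a.toNat [] ++ [edge.getD 1 0]] ++ v_ar.drop (a.toNat + 1))
  | some a, some b =>
      if a = b then (0, v_ar)
      else
        let lo := (min a b).toNat
        let hi := (max a b).toNat
        let merged := v_ar.getD lo [] ++ v_ar.getD hi []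
        (1, merged :: v_ar.filter (fun x => x != v_ar.getD lo [] && x != v_ar.getD hi []))

-- ===== PRECONDITION & SPEC =====
-- Python A raises IndexError on edge[0]/edge[1] whenever edge has fewer than two elements.
def Pre_add_visit (v_ar : List (List Int)) (edge : List Int) : Prop := 2 ≤ edge.length
instance (v_ar : List (List Int)) (edge : List Int) : Decidable (Pre_add_visit v_ar edge) := by unfold Pre_add_visit; infer_instance
def pvWitness_add_visit : List (List Int) × List Int := ([[1, 2], [3]], [2, 3])

def Spec_add_visit (v_ar : List (List Int)) (edge : List Int) (out : Int × List (List Int)) : Prop := out = add_visit_alt v_ar edge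
instance (v_ar : List (List Int)) (edge : List Int) (out : Int × List (List Int)) : Decidable (Spec_add_visit v_ar edge out) := by unfold Spec_add_visit; infer_instance

-- ===== CLAIM (what is proved, stated in full; the proofs are below) =====
def Claim_equal_add_visit : Prop := ∀ (v_ar : List (List Int)) (edge : List Int), Dom_add_visit v_ar edge → Pre_add_visit v_ar edge → Spec_add_visit v_ar edge (add_visit v_ar edge)

-- ===== LEMMAS AND PROOFS =====

-- first index k with x ∈ v_ar[k] (proof-side characterisation shared by both sides)
def pvFirstIdx : List (List Int) → Int → Option Nat
  | [], _ => none
  | comp :: rest, x => if x ∈ comp then some 0 else (pvFirstIdx rest x).map (· + 1)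

-- abstract form of B's case split, phrased with pvFirstIdx
def pvAltCore (v_ar : List (List Int)) (e0 e1 : Int) : Int × List (List Int) :=
  match pvFirstIdx v_ar e0, pvFirstIdx v_ar e1 with
  | some a, some b =>
    if a = b then (0, v_ar)
    else
      let lo := Nat.min a b
      let hi := Nat.max a b
      let merged := v_ar.getD lo [] ++ v_ar.getD hi []
      (1, merged :: v_ar.filter (fun x => x != v_ar.getD lo [] && x != v_ar.getD hi []))
  | some a, none => (1, v_ar.take a ++ [v_ar.getD a [] ++ [e1]] ++ v_ar.drop (a + 1))
  | none, some b => (1, v_ar.take b ++ [v_ar.getD b [] ++ [e0]] ++ v_ar.drop (b + 1))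
  | none, none => (1, v_ar ++ [[e0, e1]])

lemma pvInnerA_eq_pvFirstIdx (vs : List (List Int)) (e : Int) : pvInnerA vs e = pvFirstIdx vs e := by
  induction vs with
  | nil => rfl
  | cons v rest ih => simp [pvInnerA, pvFirstIdx, ih]

-- the inner setdefault loop over one component: first-wins lookup
lemma pvInnerFold_get (k : Int) (e : Int) :
    ∀ (comp : List Int) (d : PySem.Dict Int Int),
    (comp.foldl (fun d x => d.setdefault x k) d).get? e
      = (d.get? e).orElse (fun _ => if e ∈ comp then some k else none) := by
  intro comp
  induction comp with
  | nil => intro d; cases h : d.get? e <;> simp [h, Option.orElse]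
  | cons x rest ih =>
    intro d
    rw [List.foldl_cons, ih]
    by_cases hex : e = x
    · subst hex
      rw [PySem.Dict.get?_setdefault_self]
      cases h : d.get? e <;> simp [h, Option.orElse]
    · rw [PySem.Dict.get?_setdefault_of_ne d k hex]
      cases h : d.get? e <;> simp [h, Option.orElse, hex]

-- the outer enumerate fold: dict lookup = pvFirstIdx shifted by the start index
lemma pvBuildFold_get (e : Int) :
    ∀ (vs : List (List Int)) (s : Int) (d : PySem.Dict Int Int),
    ((PySem.List.enumerate vs s).foldl
        (fun d kc => kc.2.foldl (fun d x => d.setdefault x kc.1) d) d).get? e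
      = (d.get? e).orElse (fun _ => (pvFirstIdx vs e).map (fun k => s + (k : Int))) := by
  intro vs
  induction vs with
  | nil =>
    intro s d
    simp only [PySem.List.enumerate_nil, List.foldl_nil, pvFirstIdx, Option.map_none]
    cases h : d.get? e <;> simp [h, Option.orElse]
  | cons v rest ih =>
    intro s d
    rw [PySem.List.enumerate_cons, List.foldl_cons, ih, pvInnerFold_get]
    by_cases hv : e ∈ v
    · cases h : d.get? e <;> simp [h, Option.orElse, pvFirstIdx, hv]
    · cases h : d.get? e <;> simp [h, Option.orElse, pvFirstIdx, hv] <;>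
        (cases pvFirstIdx rest e <;> simp <;> omega)

lemma pvBuildIdx_get (v_ar : List (List Int)) (e : Int) :
    (pvBuildIdx v_ar).get? e = (pvFirstIdx v_ar e).map (fun k => (k : Int)) := by
  rw [pvBuildIdx, pvBuildFold_get]
  simp [Option.orElse]

-- B's dict-based port computes pvAltCore
lemma alt_eq_core (v_ar : List (List Int)) (edge : List Int) :
    add_visit_alt v_ar edge = pvAltCore v_ar (edge.getD 0 0) (edge.getD 1 0) := by
  simp only [add_visit_alt, pvAltCore, pvBuildIdx_get]
  cases h0 : pvFirstIdx v_ar (edge.getD 0 0) with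
  | none =>
    cases h1 : pvFirstIdx v_ar (edge.getD 1 0) with
    | none => simp
    | some b => simp
  | some a =>
    cases h1 : pvFirstIdx v_ar (edge.getD 1 0) with
    | none => simp
    | some b =>
      simp only [Option.map_some]
      by_cases hab : a = b
      · simp [hab]
      · have hab' : (a : Int) ≠ (b : Int) := by exact_mod_cast hab
        have hmin : (min (a : Int) (b : Int)).toNat = Nat.min a b := by
          rcases le_or_gt a b with h | h
          · simp [Nat.min_eq_left h, min_eq_left (by exact_mod_cast h : (a:Int) ≤ b)]
          · have hb : (b:Int) ≤ a := by exact_mod_cast Nat.le_of_lt h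
            simp [Nat.min_eq_right (Nat.le_of_lt h), min_eq_right hb]
        have hmax : (max (a : Int) (b : Int)).toNat = Nat.max a b := by
          rcases le_or_gt a b with h | h
          · simp [Nat.max_eq_right h, max_eq_right (by exact_mod_cast h : (a:Int) ≤ b)]
          · have hb : (b:Int) ≤ a := by exact_mod_cast Nat.le_of_lt h
            simp [Nat.max_eq_left (Nat.le_of_lt h), max_eq_left hb]
        simp [hab, hab', hmin, hmax]

lemma pvFirstIdx_append_clean (pre rest : List (List Int)) (e : Int)
    (h : ∀ v ∈ pre, e ∉ v) :
    pvFirstIdx (pre ++ rest) e = (pvFirstIdx rest e).map (· + pre.length) := by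
  induction pre with
  | nil => simp [Option.map_id']
  | cons v pre ih =>
    have hv : e ∉ v := (h v (by simp)).elim
    simp only [List.cons_append, pvFirstIdx, if_neg hv,
      ih (fun w hw => h w (by simp [hw])), Option.map_map, List.length_cons]
    cases pvFirstIdx rest e <;> simp [Function.comp] <;> omega

lemma pvGetD_mid (pre rest : List (List Int)) (vi : List Int) :
    (pre ++ vi :: rest).getD pre.length [] = vi := by
  induction pre with
  | nil => rfl
  | cons v pre ih => simpa using ih

lemma pvSet_mid (pre rest : List (List Int)) (vi w : List Int) :
    (pre ++ vi :: rest).set pre.length w = pre ++ w :: rest := by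
  induction pre with
  | nil => rfl
  | cons v pre ih => simpa using ih

lemma pvTakeDrop_mid (pre rest : List (List Int)) (vi w : List Int) :
    (pre ++ vi :: rest).take pre.length ++ [w] ++ (pre ++ vi :: rest).drop (pre.length + 1)
      = pre ++ w :: rest := by
  induction pre with
  | nil => rfl
  | cons v pre ih => simpa using ih

lemma pvOuter_eq_core (e0 e1 : Int) :
    ∀ (rest pre : List (List Int)), (∀ v ∈ pre, e0 ∉ v ∧ e1 ∉ v) →
    pvOuterA (pre ++ rest) e0 e1 rest pre.length = pvAltCore (pre ++ rest) e0 e1 := by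
  intro rest
  induction rest with
  | nil =>
    intro pre h
    have h0 : pvFirstIdx pre e0 = none := by
      have := pvFirstIdx_append_clean pre [] e0 (fun v hv => (h v hv).1); simpa using this
    have h1 : pvFirstIdx pre e1 = none := by
      have := pvFirstIdx_append_clean pre [] e1 (fun v hv => (h v hv).2); simpa using this
    simp [pvOuterA, pvAltCore, h0, h1]
  | cons vi rest ih =>
    intro pre h
    have hc0 : ∀ v ∈ pre, e0 ∉ v := fun v hv => (h v hv).1
    have hc1 : ∀ v ∈ pre, e1 ∉ v := fun v hv => (h v hv).2
    have hA0 := pvFirstIdx_append_clean pre (vi :: rest) e0 hc0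
    have hA1 := pvFirstIdx_append_clean pre (vi :: rest) e1 hc1
    by_cases h0 : e0 ∈ vi
    · have f0 : pvFirstIdx (pre ++ vi :: rest) e0 = some pre.length := by
        rw [hA0]; simp [pvFirstIdx, h0]
      by_cases h1 : e1 ∈ vi
      · have f1 : pvFirstIdx (pre ++ vi :: rest) e1 = some pre.length := by
          rw [hA1]; simp [pvFirstIdx, h1]
        simp [pvOuterA, h0, h1, pvAltCore, f0, f1]
      · -- e0 in vi, e1 not in vi: inner scan for e1
        cases hf : pvFirstIdx rest e1 with
        | none =>
          have f1 : pvFirstIdx (pre ++ vi :: rest) e1 = none := by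
            rw [hA1]; simp [pvFirstIdx, h1, hf]
          simp only [pvOuterA, if_pos h0, if_neg h1, pvInnerA_eq_pvFirstIdx, f1,
            pvAltCore, f0]
          rw [pvSet_mid, pvGetD_mid, pvTakeDrop_mid]
        | some k =>
          have f1 : pvFirstIdx (pre ++ vi :: rest) e1 = some (k + 1 + pre.length) := by
            rw [hA1]; simp [pvFirstIdx, h1, hf]
          have hne : pre.length ≠ k + 1 + pre.length := by omega
          have hmin : Nat.min pre.length (k + 1 + pre.length) = pre.length :=
            Nat.min_eq_left (by omega)
          have hmax : Nat.max pre.length (k + 1 + pre.length) = k + 1 + pre.length :=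
            Nat.max_eq_right (by omega)
          simp only [pvOuterA, if_pos h0, if_neg h1, pvInnerA_eq_pvFirstIdx, f1,
            pvAltCore, f0, if_neg hne, hmin, hmax, pvGetD_mid]
    · by_cases h1 : e1 ∈ vi
      · have f1 : pvFirstIdx (pre ++ vi :: rest) e1 = some pre.length := by
          rw [hA1]; simp [pvFirstIdx, h1]
        cases hf : pvFirstIdx rest e0 with
        | none =>
          have f0 : pvFirstIdx (pre ++ vi :: rest) e0 = none := by
            rw [hA0]; simp [pvFirstIdx, h0, hf]
          simp only [pvOuterA, if_neg h0, if_pos h1, pvInnerA_eq_pvFirstIdx, f0,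
            pvAltCore, f1]
          rw [pvSet_mid, pvGetD_mid, pvTakeDrop_mid]
        | some k =>
          have f0 : pvFirstIdx (pre ++ vi :: rest) e0 = some (k + 1 + pre.length) := by
            rw [hA0]; simp [pvFirstIdx, h0, hf]
          have hne : k + 1 + pre.length ≠ pre.length := by omega
          have hmin : Nat.min (k + 1 + pre.length) pre.length = pre.length :=
            Nat.min_eq_right (by omega)
          have hmax : Nat.max (k + 1 + pre.length) pre.length = k + 1 + pre.length :=
            Nat.max_eq_left (by omega)
          simp only [pvOuterA, if_neg h0, if_pos h1, pvInnerA_eq_pvFirstIdx, f0,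
            pvAltCore, f1, if_neg hne, hmin, hmax, pvGetD_mid]
      · have step : pvOuterA (pre ++ vi :: rest) e0 e1 (vi :: rest) pre.length
            = pvOuterA (pre ++ vi :: rest) e0 e1 rest (pre.length + 1) := by
          simp [pvOuterA, h0, h1]
        have horig : (pre ++ [vi]) ++ rest = pre ++ vi :: rest := by simp
        have hlen : (pre ++ [vi]).length = pre.length + 1 := by simp
        have := ih (pre ++ [vi]) (by
          intro v hv
          rcases List.mem_append.mp hv with hv | hv
          · exact h v hv
          · simp at hv; subst hv; exact ⟨h0, h1⟩)
        rw [horig, hlen] at this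
        rw [step, this]

-- ===== VERDICT (by name: the statement is the Claim_ definition above) =====
theorem add_visit_spec : Claim_equal_add_visit := by
  intro v_ar edge _ _
  unfold Spec_add_visit add_visit
  rw [alt_eq_core]
  simpa using pvOuter_eq_core (edge.getD 0 0) (edge.getD 1 0) v_ar []
    (by intro v hv; simp at hv)
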